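-- pv_equiv track=rewrite | github.com/KENNEDOUANLA/cours_en_ligne | py/TP_2/S02_TP05_template.py | get_coordinates_from_cell_number
-- ===== SOURCE A (Python) =====
-- def get_coordinates_from_cell_number(grid: list[list[any]], cell_number: int):
--     k = 0
--     for i in range(len(grid)):
--         for j in range(len(grid[i])):
--             if (k == cell_number):
--                 return (i, j)
--             k += 1
--
--     return (-1, -1)
-- ===== SOURCE B (Python) =====
-- def get_coordinates_from_cell_number(grid: list[list[any]], cell_number: int):
--     rem = cell_number
--     for i, row in enumerate(grid):
--         if 0 <= rem < len(row):
--             return (i, rem)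
--         rem -= len(row)
--     return (-1, -1)
-- ===== Notes on version B (the rewrite author's own statement) =====
-- stated objective: faster
-- what changed: Instead of counting every cell with a nested loop, B subtracts whole row lengths from cell_number and returns as soon as the remainder falls inside a row, skipping the per-cell inner loop.
import Mathlib
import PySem

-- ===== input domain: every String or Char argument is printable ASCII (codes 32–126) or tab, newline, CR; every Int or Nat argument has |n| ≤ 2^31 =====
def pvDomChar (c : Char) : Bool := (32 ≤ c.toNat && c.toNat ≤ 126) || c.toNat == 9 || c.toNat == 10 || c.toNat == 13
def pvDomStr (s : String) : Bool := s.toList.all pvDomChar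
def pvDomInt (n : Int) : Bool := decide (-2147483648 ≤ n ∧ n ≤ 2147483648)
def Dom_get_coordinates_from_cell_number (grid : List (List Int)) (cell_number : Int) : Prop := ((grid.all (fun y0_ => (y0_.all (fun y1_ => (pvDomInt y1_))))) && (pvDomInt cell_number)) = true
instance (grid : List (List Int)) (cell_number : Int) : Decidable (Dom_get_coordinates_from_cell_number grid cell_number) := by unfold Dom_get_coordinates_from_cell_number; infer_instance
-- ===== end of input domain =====

-- B replaces A's per-cell nested counting loop by a per-row subtraction of row lengths (objective: faster, O(rows) vs O(cell_number)).

-- ===== PORT A =====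
-- inner loop: for j in range(len(grid[i])): if k == cell_number: return (i,j); k += 1
-- returns (early-return result, final k)
def pvAInner (i : Int) (row : List Int) (j k cell : Int) : Option (Int × Int) × Int :=
  match row with
  | [] => (none, k)
  | _ :: rest => if k = cell then (some (i, j), k) else pvAInner i rest (j + 1) (k + 1) cell

-- outer loop: for i in range(len(grid)): …
def pvAOuter (grid : List (List Int)) (i k cell : Int) : Int × Int :=
  match grid with
  | [] => (-1, -1)
  | row :: rest =>
    match pvAInner i row 0 k cell with
    | (some p, _) => p
    | (none, k') => pvAOuter rest (i + 1) k' cell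

def get_coordinates_from_cell_number (grid : List (List Int)) (cell_number : Int) : Int × Int :=
  pvAOuter grid 0 0 cell_number

-- ===== PORT B =====
-- for i, row in enumerate(grid): if 0 <= rem < len(row): return (i, rem); rem -= len(row)
def pvBGo (grid : List (List Int)) (i rem : Int) : Int × Int :=
  match grid with
  | [] => (-1, -1)
  | row :: rest =>
    if 0 ≤ rem ∧ rem < (row.length : Int) then (i, rem)
    else pvBGo rest (i + 1) (rem - (row.length : Int))

def get_coordinates_from_cell_number_alt (grid : List (List Int)) (cell_number : Int) : Int × Int :=
  pvBGo grid 0 cell_number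

-- ===== PRECONDITION & SPEC =====
def Spec_get_coordinates_from_cell_number (grid : List (List Int)) (cell_number : Int) (out : Int × Int) : Prop := out = get_coordinates_from_cell_number_alt grid cell_number
instance (grid : List (List Int)) (cell_number : Int) (out : Int × Int) : Decidable (Spec_get_coordinates_from_cell_number grid cell_number out) := by unfold Spec_get_coordinates_from_cell_number; infer_instance

-- ===== CLAIM (what is proved, stated in full; the proofs are below) =====
def Claim_equal_get_coordinates_from_cell_number : Prop := ∀ (grid : List (List Int)) (cell_number : Int), Dom_get_coordinates_from_cell_number grid cell_number → Spec_get_coordinates_from_cell_number grid cell_number (get_coordinates_from_cell_number grid cell_number)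

-- ===== LEMMAS AND PROOFS =====
theorem pvAInner_eq (i : Int) (row : List Int) :
    ∀ (j k cell : Int), pvAInner i row j k cell =
      if 0 ≤ cell - k ∧ cell - k < (row.length : Int)
      then (some (i, j + (cell - k)), cell)
      else (none, k + (row.length : Int)) := by
  induction row with
  | nil =>
    intro j k cell
    simp only [pvAInner, List.length_nil, Nat.cast_zero]
    rw [if_neg (by omega)]
    simp
  | cons a rest ih =>
    intro j k cell
    simp only [pvAInner, List.length_cons]
    by_cases hk : k = cell
    · subst hk
      rw [if_pos rfl, if_pos (by push_cast; omega)]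
      simp
    · rw [if_neg hk, ih]
      have hne : cell - k ≠ 0 := fun h => hk (by omega)
      split_ifs with h1 h2 h2
      · simp only [Prod.mk.injEq, Option.some.injEq, and_true, true_and]
        omega
      · exact absurd (by push_cast at h1 ⊢; omega) h2
      · exact absurd (by push_cast at h2 ⊢; omega) h1
      · simp only [Prod.mk.injEq, true_and]
        push_cast
        omega

theorem pvAOuter_eq_pvBGo (grid : List (List Int)) :
    ∀ (i k cell : Int), pvAOuter grid i k cell = pvBGo grid i (cell - k) := by
  induction grid with
  | nil => intro i k cell; rfl
  | cons row rest ih =>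
    intro i k cell
    simp only [pvAOuter, pvBGo, pvAInner_eq]
    by_cases h : 0 ≤ cell - k ∧ cell - k < (row.length : Int)
    · rw [if_pos h, if_pos h]
      show (i, 0 + (cell - k)) = (i, cell - k)
      rw [zero_add]
    · rw [if_neg h, if_neg h]
      show pvAOuter rest (i + 1) (k + (row.length : Int)) cell = _
      rw [ih]
      congr 1
      omega

-- ===== VERDICT (by name: the statement is the Claim_ definition above) =====
theorem get_coordinates_from_cell_number_spec : Claim_equal_get_coordinates_from_cell_number := by
  intro grid cell _
  unfold Spec_get_coordinates_from_cell_number get_coordinates_from_cell_number get_coordinates_from_cell_number_alt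
  rw [pvAOuter_eq_pvBGo, sub_zero]
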